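-- pv_equiv track=rewrite | github.com/Tawan67/OOD-2rd | week4/lab5_5.py | purity
-- ===== SOURCE A (Python) =====
-- def fibo(n):
--     if n == 1 or n==2:
--         return 1
--     return fibo(n-1)+fibo(n-2)
--
-- def purity(n,weight):
--
--     if n == 1:
--         if weight <= 0:
--             return -1
--         return weight
--
--     ck = fibo(n-1)
--
--     start = (weight*2)-ck # minimum a+b can be
--     end = start+1 #maximum a+b can be
--     a = end//2
--     b = end-a
--     p_a = purity(n-1,a)
--     p_b = purity(n-1,b)
--
--     if p_a == -1 or p_b == -1:
--         return -1
--     stone=p_a+p_b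
--
--     return stone
-- ===== SOURCE B (Python) =====
-- def purity(n, weight):
--     # Closed form: purity(n, w) = -1 if w <= t else c*w + d, where along k = 2..n
--     # (f = fib(k-1)):  t += f//2,  d = 2*d + c*(1-f),  c *= 2.  O(n) instead of O(2^n).
--     c, d, t = 1, 0, 0
--     f, g = 1, 1
--     for _ in range(2, n + 1):
--         t += f // 2
--         d = 2 * d + c * (1 - f)
--         c *= 2
--         f, g = g, f + g
--     return -1 if weight <= t else c * weight + d
-- ===== Notes on version B (the rewrite author's own statement) =====
-- stated objective: faster
-- what changed: Replaced the doubly-exponential tree recursion (with naive recursive Fibonacci recomputed at every node) by a single loop that carries the coefficients of the closed form purity(n,w) = c*w + d (with a -1 threshold t) together with an iterative Fibonacci pair; intended as asymptotically faster — in a timing run A already timed out at n=16 while B returned, so no ratio could be measured.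
import Mathlib
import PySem

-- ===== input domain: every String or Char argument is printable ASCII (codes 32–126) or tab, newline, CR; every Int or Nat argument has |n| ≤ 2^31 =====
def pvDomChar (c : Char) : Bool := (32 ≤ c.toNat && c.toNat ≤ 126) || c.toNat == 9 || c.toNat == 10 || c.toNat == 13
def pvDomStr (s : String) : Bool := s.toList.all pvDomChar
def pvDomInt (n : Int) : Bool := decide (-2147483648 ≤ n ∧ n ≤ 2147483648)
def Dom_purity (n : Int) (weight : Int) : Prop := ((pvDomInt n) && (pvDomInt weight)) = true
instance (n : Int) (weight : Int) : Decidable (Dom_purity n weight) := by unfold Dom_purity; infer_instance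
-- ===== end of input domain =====

-- B replaces A's doubly-exponential tree recursion by one O(n) loop carrying the
-- closed-form coefficients (c, d, threshold t) and an iterative Fibonacci pair;
-- intended as faster: in a timing run A timed out at n=16 while B returned
-- (no ratio measurable there).

-- ===== PORT A =====
-- Python's fibo diverges for n ≤ 0 (infinite recursion); the 'n ≤ 0 → 0' guard only
-- makes the Lean function total, it is never reached from purity inside Pre_purity.
def fibo (n : Int) : Int :=
  if n = 1 ∨ n = 2 then 1
  else if _h : n ≤ 0 then 0
  else fibo (n - 1) + fibo (n - 2)
termination_by n.toNat
decreasing_by all_goals omega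

-- Python's purity diverges for n ≤ 0 (via fibo); same totality-only guard.
def purity (n : Int) (weight : Int) : Int :=
  if n = 1 then
    if weight ≤ 0 then -1 else weight
  else if _h : n ≤ 0 then 0
  else
    let ck := fibo (n - 1)
    let start := weight * 2 - ck
    let en := start + 1
    let a := PySem.Int.floordiv en 2
    let b := en - a
    let p_a := purity (n - 1) a
    let p_b := purity (n - 1) b
    if p_a = -1 ∨ p_b = -1 then -1
    else p_a + p_b
termination_by n.toNat
decreasing_by all_goals omega

-- ===== PORT B =====
-- Source B's 'for _ in range(2, n+1)' loop (the counter is unused) ported as a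
-- tail recursion on the iteration count (n-1).toNat over the same 5-tuple state.
def purityLoop : Nat → Int × Int × Int × Int × Int → Int × Int × Int × Int × Int
  | 0, s => s
  | m + 1, (c, d, t, f, g) =>
      purityLoop m (2 * c, 2 * d + c * (1 - f), t + PySem.Int.floordiv f 2, g, f + g)

def purity_alt (n : Int) (weight : Int) : Int :=
  let s := purityLoop (n - 1).toNat (1, 0, 0, 1, 1)
  if weight ≤ s.2.2.1 then -1 else s.1 * weight + s.2.1

-- ===== PRECONDITION & SPEC =====
-- Pre_: Python's A recurses forever (RecursionError) for n ≤ 0 — fibo(n-1) never bottoms out.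
def Pre_purity (n : Int) (weight : Int) : Prop := 1 ≤ n
instance (n : Int) (weight : Int) : Decidable (Pre_purity n weight) := by unfold Pre_purity; infer_instance
def pvWitness_purity : Int × Int := (4, 7)
def Spec_purity (n : Int) (weight : Int) (out : Int) : Prop := out = purity_alt n weight
instance (n : Int) (weight : Int) (out : Int) : Decidable (Spec_purity n weight out) := by unfold Spec_purity; infer_instance

-- ===== CLAIM (what is proved, stated in full; the proofs are below) =====
def Claim_equal_purity : Prop := ∀ (n : Int) (weight : Int), Dom_purity n weight → Pre_purity n weight → Spec_purity n weight (purity n weight)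

-- ===== LEMMAS AND PROOFS =====

-- unfolding lemmas for the two well-founded recursions
theorem fibo_eq (n : Int) (h1 : ¬(n = 1 ∨ n = 2)) (h0 : ¬ n ≤ 0) :
    fibo n = fibo (n - 1) + fibo (n - 2) := by
  rw [fibo]; rw [if_neg h1, dif_neg h0]

theorem purity_one (w : Int) : purity 1 w = if w ≤ 0 then -1 else w := by
  rw [purity]; simp

theorem purity_eq (n w : Int) (h1 : n ≠ 1) (h0 : ¬ n ≤ 0) :
    purity n w =
      (let a := PySem.Int.floordiv (w * 2 - fibo (n - 1) + 1) 2;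
       let b := (w * 2 - fibo (n - 1) + 1) - a;
       if purity (n - 1) a = -1 ∨ purity (n - 1) b = -1 then -1
       else purity (n - 1) a + purity (n - 1) b) := by
  rw [purity]; rw [if_neg h1, dif_neg h0]

-- state after m iterations of the loop
def S (m : Nat) : Int × Int × Int × Int × Int := purityLoop m (1, 0, 0, 1, 1)

def stepS (s : Int × Int × Int × Int × Int) : Int × Int × Int × Int × Int :=
  (2 * s.1, 2 * s.2.1 + s.1 * (1 - s.2.2.2.1), s.2.2.1 + PySem.Int.floordiv s.2.2.2.1 2,
   s.2.2.2.2, s.2.2.2.1 + s.2.2.2.2)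

theorem purityLoop_succ (m : Nat) (s : Int × Int × Int × Int × Int) :
    purityLoop (m + 1) s = stepS (purityLoop m s) := by
  induction m generalizing s with
  | zero => rfl
  | succ k ih =>
      obtain ⟨c, d, t, f, g⟩ := s
      have h1 : purityLoop (k + 1 + 1) (c, d, t, f, g)
          = purityLoop (k + 1) (2*c, 2*d + c*(1-f), t + PySem.Int.floordiv f 2, g, f+g) := rfl
      have h2 : purityLoop (k + 1) (c, d, t, f, g)
          = purityLoop k (2*c, 2*d + c*(1-f), t + PySem.Int.floordiv f 2, g, f+g) := rfl
      rw [h1, ih, h2]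

theorem S_succ (m : Nat) : S (m + 1) = stepS (S m) := purityLoop_succ m _

-- Fibonacci pair invariant: f = fibo (m+1), g = fibo (m+2), both ≥ 1.
theorem S_fib (m : Nat) :
    (S m).2.2.2.1 = fibo (m + 1) ∧ (S m).2.2.2.2 = fibo (m + 2) ∧
    1 ≤ (S m).2.2.2.1 ∧ 1 ≤ (S m).2.2.2.2 := by
  induction m with
  | zero =>
      refine ⟨?_, ?_, by decide, by decide⟩ <;> simp [S, purityLoop, fibo]
  | succ k ih =>
      obtain ⟨hf, hg, hf1, hg1⟩ := ih
      rw [S_succ]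
      push_cast
      refine ⟨by simpa [stepS] using hg, ?_, ?_, ?_⟩
      · show (S k).2.2.2.1 + (S k).2.2.2.2 = fibo (↑k + 1 + 1 + 1)
        rw [hf, hg, fibo_eq (↑k + 1 + 1 + 1) (by omega) (by omega)]
        have e1 : (k:Int) + 1 + 1 + 1 - 1 = ↑k + 2 := by omega
        have e2 : (k:Int) + 1 + 1 + 1 - 2 = ↑k + 1 := by omega
        rw [e1, e2]; omega
      · simpa [stepS] using hg1
      · show 1 ≤ (S k).2.2.2.1 + (S k).2.2.2.2; omega

-- Main characterisation of A's recursion by the closed form carried in S.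
theorem purity_closed (m : Nat) (w : Int) :
    (purity (m + 1) w = -1 ∧ w ≤ (S m).2.2.1) ∨
    (purity (m + 1) w = (S m).1 * w + (S m).2.1 ∧ (S m).2.2.1 < w ∧ 0 < purity (m + 1) w) := by
  induction m generalizing w with
  | zero =>
      push_cast
      rw [purity_one]
      by_cases hw : w ≤ 0
      · left; exact ⟨by simp [hw], by simpa [S, purityLoop] using hw⟩
      · right
        refine ⟨by simp [hw, S, purityLoop], ?_, by simp [hw]; omega⟩
        simpa [S, purityLoop] using hw
  | succ k ih =>
      push_cast
      have hfib : fibo ((↑k + 1 + 1) - 1) = (S k).2.2.2.1 := by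
        have h := (S_fib k).1; rw [h]; norm_num
      rw [purity_eq (↑k + 1 + 1) w (by omega) (by omega), hfib]
      have e1 : ((k:Int) + 1 + 1) - 1 = ↑k + 1 := by omega
      rw [e1]
      dsimp only
      set f := (S k).2.2.2.1 with hf
      set t := (S k).2.2.1 with ht
      set c := (S k).1 with hc
      set d := (S k).2.1 with hd
      have hf1 : 1 ≤ f := (S_fib k).2.2.1
      have hdiv : PySem.Int.floordiv (w * 2 - f + 1) 2 = (w * 2 - f + 1) / 2 :=
        PySem.Int.floordiv_eq_ediv_of_pos (by omega)
      set a := PySem.Int.floordiv (w * 2 - f + 1) 2 with ha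
      set b := (w * 2 - f + 1) - a with hb
      have hab : a + b = w * 2 - f + 1 := by omega
      have hba : a ≤ b := by omega
      -- next-level state components
      have hS : S (k+1) = stepS (S k) := S_succ k
      have ht' : (S (k+1)).2.2.1 = t + PySem.Int.floordiv f 2 := by rw [hS]; rfl
      have hc' : (S (k+1)).1 = 2 * c := by rw [hS]; rfl
      have hd' : (S (k+1)).2.1 = 2 * d + c * (1 - f) := by rw [hS]; rfl
      have hfd : PySem.Int.floordiv f 2 = f / 2 := PySem.Int.floordiv_eq_ediv_of_pos (by omega)
      by_cases hw : w ≤ (S (k+1)).2.2.1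
      · -- below threshold: a ≤ t, so purity at a is -1
        have hat : a ≤ t := by rw [ht', hfd] at hw; omega
        left
        refine ⟨?_, hw⟩
        rcases ih a with ⟨hpa, _⟩ | ⟨_, hgt, _⟩
        · simp [hpa]
        · omega
      · right
        rw [not_le] at hw
        have hat : t < a := by rw [ht', hfd] at hw; omega
        have hbt : t < b := by omega
        rcases ih a with ⟨_, hle⟩ | ⟨hpa, _, hpa0⟩
        · omega
        rcases ih b with ⟨_, hle⟩ | ⟨hpb, _, hpb0⟩
        · omega
        have hane : ¬(c * a + d = -1 ∨ c * b + d = -1) := by omega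
        simp only [hpa, hpb]
        rw [if_neg hane]
        refine ⟨?_, hw, by omega⟩
        rw [hc', hd']
        linear_combination c * hab

-- ===== VERDICT (by name: the statement is the Claim_ definition above) =====
theorem purity_spec : Claim_equal_purity := by
  intro n weight _ hpre
  have hm : n = ((n - 1).toNat : Int) + 1 := by
    have h1 : (1:Int) ≤ n := hpre
    omega
  show purity n weight = purity_alt n weight
  rw [hm]
  have hres := purity_closed (n - 1).toNat weight
  have halt : purity_alt (((n - 1).toNat : Int) + 1) weight
      = if weight ≤ (S (n-1).toNat).2.2.1 then -1
        else (S (n-1).toNat).1 * weight + (S (n-1).toNat).2.1 := by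
    unfold purity_alt S
    have : ((((n - 1).toNat : Int) + 1) - 1).toNat = (n - 1).toNat := by omega
    rw [this]
  rw [halt]
  rcases hres with ⟨h, hle⟩ | ⟨h, hgt, _⟩
  · rw [h, if_pos hle]
  · rw [h, if_neg (by omega)]
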